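-- pv_equiv track=rewrite | github.com/dariavasile/DataInTheWildProject | Data Processing/size_converter_shein.py | extract_min_max_sizes
-- ===== SOURCE A (Python) =====
-- def extract_min_max_sizes(sizes):
--     size_list = sizes.split('/')
--     size_list = [s.strip() for s in size_list]
--     sizes_order = ['XXS','XS', 'S', 'M', 'L', 'XL', '1XL', 'XXL','2XL','3XL','4XL','5XL', '6XL']
--     min_size = max_size = None
--
--     for size in size_list:
--         if size in sizes_order:
--             if min_size is None or sizes_order.index(size) < sizes_order.index(min_size):
--                 min_size = size
--             if max_size is None or sizes_order.index(size) > sizes_order.index(max_size):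
--                 max_size = size
--
--     return min_size, max_size
-- ===== SOURCE B (Python) =====
-- def extract_min_max_sizes(sizes):
--     order = ['XXS','XS','S','M','L','XL','1XL','XXL','2XL','3XL','4XL','5XL','6XL']
--     present = {s.strip() for s in sizes.split('/')}
--     mn = next((o for o in order if o in present), None)
--     mx = next((o for o in reversed(order) if o in present), None)
--     return mn, mx
-- ===== Notes on version B (the rewrite author's own statement) =====
-- stated objective: alternative
-- what changed: Instead of scanning the input tokens with two running extrema and repeated list.index calls, B builds a set of the stripped tokens once and then scans the fixed size table itself: the minimum is the first table entry present in the set, the maximum the first entry of the reversed table present; correct because the order-index of a size is exactly its position in the table.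
import Mathlib
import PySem

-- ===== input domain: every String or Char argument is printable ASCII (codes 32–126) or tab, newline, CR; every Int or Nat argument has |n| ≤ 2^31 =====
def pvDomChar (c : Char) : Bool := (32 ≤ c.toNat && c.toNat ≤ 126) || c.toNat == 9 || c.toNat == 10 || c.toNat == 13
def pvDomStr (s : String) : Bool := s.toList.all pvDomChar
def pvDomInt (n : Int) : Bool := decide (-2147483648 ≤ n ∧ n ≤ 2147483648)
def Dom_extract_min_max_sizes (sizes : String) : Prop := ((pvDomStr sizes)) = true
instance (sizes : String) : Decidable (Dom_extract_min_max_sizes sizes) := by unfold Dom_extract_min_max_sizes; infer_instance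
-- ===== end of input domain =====

-- B scans the fixed size table against a set of the stripped tokens (min = first table
-- entry present, max = first entry of the reversed table present) instead of A's single
-- pass over the tokens with two running extrema and repeated list.index calls (alternative).


-- the shared constant list sizes_order
def sizesOrder : List String :=
  ["XXS", "XS", "S", "M", "L", "XL", "1XL", "XXL", "2XL", "3XL", "4XL", "5XL", "6XL"]

-- sizes_order.index(s); in A it is only applied to members of sizesOrder,
-- so the .getD 0 default is never reached
def orderIdx (s : String) : Nat := (PySem.List.index? sizesOrder s).getD 0

-- ===== PORT A =====
-- the body of A's for-loop (branches in A's order)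
def stepA (st : Option String × Option String) (size : String) : Option String × Option String :=
  if size ∈ sizesOrder then
    ((match st.1 with
      | none => some size
      | some m => if orderIdx size < orderIdx m then some size else some m),
     (match st.2 with
      | none => some size
      | some m => if orderIdx size > orderIdx m then some size else some m))
  else st

def extract_min_max_sizes (sizes : String) : Option String × Option String :=
  let size_list := (PySem.Str.split? sizes "/").getD []   -- sep "/" is nonempty, so split? is some
  let size_list := size_list.map PySem.Str.strip
  size_list.foldl stepA (none, none)

-- ===== PORT B =====
def extract_min_max_sizes_alt (sizes : String) : Option String × Option String :=
  let present : PySem.Set String :=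
    PySem.Set.ofList (((PySem.Str.split? sizes "/").getD []).map PySem.Str.strip)
  let mn := sizesOrder.find? (fun o => PySem.Set.contains present o)
  let mx := sizesOrder.reverse.find? (fun o => PySem.Set.contains present o)
  (mn, mx)

-- ===== PRECONDITION & SPEC =====
def Spec_extract_min_max_sizes (sizes : String) (out : Option String × Option String) : Prop := out = extract_min_max_sizes_alt sizes
instance (sizes : String) (out : Option String × Option String) : Decidable (Spec_extract_min_max_sizes sizes out) := by unfold Spec_extract_min_max_sizes; infer_instance

-- ===== CLAIM =====
def Claim_equal_extract_min_max_sizes : Prop := ∀ (sizes : String), Dom_extract_min_max_sizes sizes → Spec_extract_min_max_sizes sizes (extract_min_max_sizes sizes)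

-- ===== LEMMAS AND PROOFS =====

-- A's min-/max-accumulator steps, named for the proofs below
def mnStep (acc : Option String) (size : String) : Option String :=
  match acc with
  | none => some size
  | some m => if orderIdx size < orderIdx m then some size else some m

def mxStep (acc : Option String) (size : String) : Option String :=
  match acc with
  | none => some size
  | some m => if orderIdx size > orderIdx m then some size else some m

-- A's guarded single pass with two running extrema is two independent folds over the valid elements
theorem foldA_gen (l : List String) (st : Option String × Option String) :
    l.foldl stepA st
      = ((l.filter (fun s => s ∈ sizesOrder)).foldl mnStep st.1,
         (l.filter (fun s => s ∈ sizesOrder)).foldl mxStep st.2) := by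
  induction l generalizing st with
  | nil => rfl
  | cons h t ih =>
    simp only [List.foldl_cons, List.filter_cons]
    by_cases hmem : h ∈ sizesOrder
    · simp [hmem, ih, stepA, mnStep, mxStep, List.foldl_cons]
    · simp [hmem, ih, stepA]

-- the min fold returns an element of minimal order-index
theorem fold_mn_spec (t : List String) (m0 : String) :
    ∃ m, t.foldl mnStep (some m0) = some m ∧ m ∈ m0 :: t ∧
      ∀ x ∈ m0 :: t, orderIdx m ≤ orderIdx x := by
  induction t generalizing m0 with
  | nil => exact ⟨m0, rfl, by simp, by simp⟩
  | cons x t ih =>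
    rcases ih (if orderIdx x < orderIdx m0 then x else m0) with ⟨m, hm, hmem, hmin⟩
    refine ⟨m, ?_, ?_, ?_⟩
    · rw [List.foldl_cons,
        show mnStep (some m0) x = some (if orderIdx x < orderIdx m0 then x else m0) from by
          simp [mnStep, apply_ite some]]
      exact hm
    · rcases List.mem_cons.mp hmem with h | h
      · split at h <;> simp [h]
      · simp [h]
    · intro y hy
      rcases List.mem_cons.mp hy with h | h
      · subst h
        have := hmin _ (List.mem_cons_self ..)
        split at this <;> omega
      · rcases List.mem_cons.mp h with h | h
        · subst h
          have := hmin _ (List.mem_cons_self ..)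
          split at this <;> omega
        · exact hmin _ (List.mem_cons_of_mem _ h)

-- the max fold returns an element of maximal order-index
theorem fold_mx_spec (t : List String) (m0 : String) :
    ∃ m, t.foldl mxStep (some m0) = some m ∧ m ∈ m0 :: t ∧
      ∀ x ∈ m0 :: t, orderIdx x ≤ orderIdx m := by
  induction t generalizing m0 with
  | nil => exact ⟨m0, rfl, by simp, by simp⟩
  | cons x t ih =>
    rcases ih (if orderIdx x > orderIdx m0 then x else m0) with ⟨m, hm, hmem, hmax⟩
    refine ⟨m, ?_, ?_, ?_⟩
    · rw [List.foldl_cons,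
        show mxStep (some m0) x = some (if orderIdx x > orderIdx m0 then x else m0) from by
          simp [mxStep, apply_ite some]]
      exact hm
    · rcases List.mem_cons.mp hmem with h | h
      · split at h <;> simp [h]
      · simp [h]
    · intro y hy
      rcases List.mem_cons.mp hy with h | h
      · subst h
        have := hmax _ (List.mem_cons_self ..)
        split at this <;> omega
      · rcases List.mem_cons.mp h with h | h
        · subst h
          have := hmax _ (List.mem_cons_self ..)
          split at this <;> omega
        · exact hmax _ (List.mem_cons_of_mem _ h)

-- find? returns the element with minimal position (index?) among those satisfying p
theorem find?_min_idx (O : List String) (p : String → Bool) (m : String)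
    (h : O.find? p = some m) :
    ∀ x ∈ O, p x →
      ((PySem.List.index? O m).getD 0) ≤ ((PySem.List.index? O x).getD 0) := by
  induction O with
  | nil => simp at h
  | cons o O ih =>
    by_cases hpo : p o
    · have hmo : m = o := by simpa [List.find?_cons, hpo] using h.symm
      subst hmo
      intro x hx hpx
      rw [PySem.List.index?_cons_self]
      simp
    · have h' : O.find? p = some m := by simpa [List.find?_cons, hpo] using h
      have hmO : m ∈ O := List.mem_of_find?_eq_some h'
      have hpm : p m := List.find?_some h'
      have hmne : o ≠ m := by rintro rfl; exact hpo hpm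
      intro x hx hpx
      have hxne : o ≠ x := by rintro rfl; exact hpo hpx
      have hxO : x ∈ O := by
        rcases List.mem_cons.mp hx with h | h
        · exact absurd h.symm hxne
        · exact h
      rcases (PySem.List.index?_isSome_iff O m).mpr hmO |> Option.isSome_iff_exists.mp with ⟨km, hkm⟩
      rcases (PySem.List.index?_isSome_iff O x).mpr hxO |> Option.isSome_iff_exists.mp with ⟨kx, hkx⟩
      have := ih h' x hxO hpx
      rw [PySem.List.index?_cons_of_ne O hmne, PySem.List.index?_cons_of_ne O hxne, hkm, hkx]
      rw [hkm, hkx] at this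
      simpa using Nat.add_le_add_right this 1

-- order-index is injective on members of the size table
theorem orderIdx_inj : ∀ a ∈ sizesOrder, ∀ b ∈ sizesOrder, orderIdx a = orderIdx b → a = b := by
  decide

-- position in the reversed table is 12 minus the order-index, and indices are ≤ 12
theorem idx_rev (y : String) (hy : y ∈ sizesOrder) :
    ((PySem.List.index? sizesOrder.reverse y).getD 0) = 12 - orderIdx y ∧ orderIdx y ≤ 12 := by
  fin_cases hy <;> decide

-- the min fold over the valid tokens equals the first table entry occurring among them
theorem min_eq (valid : List String) (hval : ∀ x ∈ valid, x ∈ sizesOrder) (p : String → Bool)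
    (hp : ∀ o ∈ sizesOrder, p o = decide (o ∈ valid)) :
    valid.foldl mnStep none = sizesOrder.find? p := by
  cases valid with
  | nil =>
    have : sizesOrder.find? p = none := by
      rw [List.find?_eq_none]
      intro o ho
      simp [hp o ho]
    rw [this]
    rfl
  | cons h t =>
    have hfold : (h :: t).foldl mnStep none = t.foldl mnStep (some h) := rfl
    rcases fold_mn_spec t h with ⟨m, hm, hmem, hmin⟩
    have hsome : (sizesOrder.find? p).isSome := by
      rw [List.find?_isSome]
      exact ⟨h, hval h (by simp), by simp [hp h (hval h (by simp))]⟩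
    rcases Option.isSome_iff_exists.mp hsome with ⟨m', hm'⟩
    have hm'O : m' ∈ sizesOrder := List.mem_of_find?_eq_some hm'
    have hm'v : m' ∈ h :: t := by
      have := List.find?_some hm'
      rw [hp m' hm'O] at this
      exact of_decide_eq_true this
    have hmO : m ∈ sizesOrder := hval m hmem
    have h1 : orderIdx m' ≤ orderIdx m := by
      have := find?_min_idx sizesOrder p m' hm' m hmO (by simp [hp m hmO, hmem])
      simpa [orderIdx] using this
    have h2 : orderIdx m ≤ orderIdx m' := hmin m' hm'v
    rw [hfold, hm, hm', orderIdx_inj m hmO m' hm'O (by omega)]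

-- the max fold over the valid tokens equals the first entry of the reversed table occurring among them
theorem max_eq (valid : List String) (hval : ∀ x ∈ valid, x ∈ sizesOrder) (p : String → Bool)
    (hp : ∀ o ∈ sizesOrder, p o = decide (o ∈ valid)) :
    valid.foldl mxStep none = sizesOrder.reverse.find? p := by
  cases valid with
  | nil =>
    have : sizesOrder.reverse.find? p = none := by
      rw [List.find?_eq_none]
      intro o ho
      rw [List.mem_reverse] at ho
      simp [hp o ho]
    rw [this]
    rfl
  | cons h t =>
    have hfold : (h :: t).foldl mxStep none = t.foldl mxStep (some h) := rfl
    rcases fold_mx_spec t h with ⟨m, hm, hmem, hmax⟩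
    have hsome : (sizesOrder.reverse.find? p).isSome := by
      rw [List.find?_isSome]
      exact ⟨h, List.mem_reverse.mpr (hval h (by simp)), by simp [hp h (hval h (by simp))]⟩
    rcases Option.isSome_iff_exists.mp hsome with ⟨m', hm'⟩
    have hm'O : m' ∈ sizesOrder := List.mem_reverse.mp (List.mem_of_find?_eq_some hm')
    have hm'v : m' ∈ h :: t := by
      have := List.find?_some hm'
      rw [hp m' hm'O] at this
      exact of_decide_eq_true this
    have hmO : m ∈ sizesOrder := hval m hmem
    have hrev : ∀ x ∈ sizesOrder.reverse, p x →
        ((PySem.List.index? sizesOrder.reverse m').getD 0) ≤ ((PySem.List.index? sizesOrder.reverse x).getD 0) :=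
      find?_min_idx sizesOrder.reverse p m' hm'
    have h1 : orderIdx m ≤ orderIdx m' := by
      have := hrev m (List.mem_reverse.mpr hmO) (by simp [hp m hmO, hmem])
      rcases idx_rev m hmO with ⟨em, bm⟩
      rcases idx_rev m' hm'O with ⟨em', bm'⟩
      rw [em, em'] at this
      omega
    have h2 : orderIdx m' ≤ orderIdx m := hmax m' hm'v
    rw [hfold, hm, hm', orderIdx_inj m hmO m' hm'O (by omega)]

theorem extract_min_max_sizes_spec : Claim_equal_extract_min_max_sizes := by
  intro sizes _
  show extract_min_max_sizes sizes = extract_min_max_sizes_alt sizes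
  unfold extract_min_max_sizes extract_min_max_sizes_alt
  set tokens := ((PySem.Str.split? sizes "/").getD []).map PySem.Str.strip with htok
  rw [foldA_gen]
  set valid := tokens.filter (fun s => s ∈ sizesOrder) with hvdef
  have hval : ∀ x ∈ valid, x ∈ sizesOrder := by
    intro x hx
    have := List.of_mem_filter hx
    simpa using this
  have hp : ∀ o ∈ sizesOrder, (PySem.Set.contains (PySem.Set.ofList tokens) o) = decide (o ∈ valid) := by
    intro o ho
    have : (o ∈ PySem.Set.ofList tokens) ↔ o ∈ valid := by
      rw [PySem.Set.mem_ofList, hvdef, List.mem_filter]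
      simp [ho]
    simp only [PySem.Set.contains]
    simp [this]
  simp only []
  rw [min_eq valid hval _ hp, max_eq valid hval _ hp]
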